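-- pv_equiv track=rewrite | github.com/marcsingleton/orthology_inference2023 | analysis/ortho_MSA/OG_filter/OG_filter.py | spid_filter
-- ===== SOURCE A (Python) =====
-- def spid_filter(spids):
--     conditions = [({'dnov', 'dvir'}, 1),
--                   ({'dmoj', 'dnav'}, 1),
--                   ({'dinn', 'dgri', 'dhyd'}, 2),
--                   ({'dgua', 'dsob'}, 1),
--                   ({'dbip', 'dana'}, 1),
--                   ({'dser', 'dkik'}, 1),
--                   ({'dele', 'drho'}, 1),
--                   ({'dtak', 'dbia'}, 1),
--                   ({'dsuz', 'dspu'}, 1),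
--                   ({'dere', 'dtei'}, 1),
--                   ({'dsan', 'dyak'}, 1),
--                   ({'dmel'}, 1),
--                   ({'dmau', 'dsim', 'dsec'}, 1)]
--     return all([len(spids & group) >= num for group, num in conditions])
-- ===== SOURCE B (Python) =====
-- _GROUP_OF = {'dnov': 0, 'dvir': 0, 'dmoj': 1, 'dnav': 1, 'dinn': 2, 'dgri': 2, 'dhyd': 2,
--              'dgua': 3, 'dsob': 3, 'dbip': 4, 'dana': 4, 'dser': 5, 'dkik': 5, 'dele': 6,
--              'drho': 6, 'dtak': 7, 'dbia': 7, 'dsuz': 8, 'dspu': 8, 'dere': 9, 'dtei': 9,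
--              'dsan': 10, 'dyak': 10, 'dmel': 11, 'dmau': 12, 'dsim': 12, 'dsec': 12}
-- _NUMS = [1, 1, 2, 1, 1, 1, 1, 1, 1, 1, 1, 1, 1]
--
-- def spid_filter(spids):
--     counts = [0] * 13
--     for s in spids:
--         i = _GROUP_OF.get(s)
--         if i is not None:
--             counts[i] += 1
--     return all(c >= n for c, n in zip(counts, _NUMS))
-- ===== Notes on version B (the rewrite author's own statement) =====
-- stated objective: alternative
-- what changed: Instead of intersecting the species set with each of the 13 groups, B builds a species-id-to-group-index dict once, makes a single pass over spids incrementing per-group counts, and checks all thresholds at the end.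
import Mathlib
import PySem

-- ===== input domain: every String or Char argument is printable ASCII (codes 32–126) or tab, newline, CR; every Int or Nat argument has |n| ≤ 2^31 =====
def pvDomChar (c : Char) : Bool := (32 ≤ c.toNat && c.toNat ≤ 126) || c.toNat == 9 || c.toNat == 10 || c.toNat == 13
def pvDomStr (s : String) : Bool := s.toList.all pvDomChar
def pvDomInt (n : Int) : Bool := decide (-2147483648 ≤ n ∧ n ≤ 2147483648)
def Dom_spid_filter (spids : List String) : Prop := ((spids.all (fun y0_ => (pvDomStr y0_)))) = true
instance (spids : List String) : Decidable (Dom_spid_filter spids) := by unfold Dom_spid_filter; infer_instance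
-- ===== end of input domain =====

-- B replaces A's 13 set-intersections with one pass over the species set, counting per
-- disjoint group through a precomputed species→group-index dict (objective: alternative).


-- ===== PORT A =====
-- `spids` is a Python set, so the list holds its distinct elements; `len(spids & group)`
-- is transliterated as the length of the sublist of spids lying in the group.
def conditionsA : List (List String × Nat) :=
  [(["dnov","dvir"],1),(["dmoj","dnav"],1),(["dinn","dgri","dhyd"],2),(["dgua","dsob"],1),
   (["dbip","dana"],1),(["dser","dkik"],1),(["dele","drho"],1),(["dtak","dbia"],1),
   (["dsuz","dspu"],1),(["dere","dtei"],1),(["dsan","dyak"],1),(["dmel"],1),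
   (["dmau","dsim","dsec"],1)]

def spid_filter (spids : List String) : Bool :=
  (conditionsA.map (fun gn => decide ((spids.filter (fun s => gn.1.contains s)).length ≥ gn.2))).all id

-- ===== PORT B =====
-- _GROUP_OF dict literal of Source B
def groupOf : PySem.Dict String Nat :=
  PySem.Dict.mk [("dnov",0),("dvir",0),("dmoj",1),("dnav",1),("dinn",2),("dgri",2),("dhyd",2),
    ("dgua",3),("dsob",3),("dbip",4),("dana",4),("dser",5),("dkik",5),("dele",6),("drho",6),
    ("dtak",7),("dbia",7),("dsuz",8),("dspu",8),("dere",9),("dtei",9),("dsan",10),("dyak",10),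
    ("dmel",11),("dmau",12),("dsim",12),("dsec",12)]

def bNums : List Nat := [1,1,2,1,1,1,1,1,1,1,1,1,1]

-- the body of Source B's `for s in spids` loop: `i = _GROUP_OF.get(s); if i is not None: counts[i] += 1`
def bStep (counts : List Nat) (s : String) : List Nat :=
  match groupOf.get? s with
  | some i => counts.set i (counts.getD i 0 + 1)
  | none => counts

def spid_filter_alt (spids : List String) : Bool :=
  let counts := spids.foldl bStep (List.replicate 13 0)
  (counts.zip bNums).all (fun cn => decide (cn.1 ≥ cn.2))

-- ===== PRECONDITION & SPEC =====
def Spec_spid_filter (spids : List String) (out : Bool) : Prop := out = spid_filter_alt spids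
instance (spids : List String) (out : Bool) : Decidable (Spec_spid_filter spids out) := by unfold Spec_spid_filter; infer_instance

-- ===== CLAIM (what is proved, stated in full; the proofs are below) =====
def Claim_equal_spid_filter : Prop := ∀ (spids : List String), Dom_spid_filter spids → Spec_spid_filter spids (spid_filter spids)

-- ===== LEMMAS AND PROOFS =====

-- occurrences in spids that B's dict sends to group i
def cnt (i : Nat) (spids : List String) : Nat :=
  spids.countP (fun s => groupOf.get? s == some i)

def gList : List (List String) := conditionsA.map Prod.fst

lemma groupOf_lt (s : String) (j : Nat) (h : groupOf.get? s = some j) : j < 13 := by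
  have hm := PySem.Dict.mem_items_of_get?_eq_some (d := groupOf) h
  have hv : j ∈ groupOf.items.map Prod.snd := List.mem_map_of_mem hm
  simp [groupOf] at hv
  omega

-- B's loop counts each group independently
lemma bFold_eq (spids : List String) : ∀ c0 c1 c2 c3 c4 c5 c6 c7 c8 c9 c10 c11 c12 : Nat,
    spids.foldl bStep [c0,c1,c2,c3,c4,c5,c6,c7,c8,c9,c10,c11,c12] =
    [c0 + cnt 0 spids, c1 + cnt 1 spids, c2 + cnt 2 spids, c3 + cnt 3 spids,
     c4 + cnt 4 spids, c5 + cnt 5 spids, c6 + cnt 6 spids, c7 + cnt 7 spids,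
     c8 + cnt 8 spids, c9 + cnt 9 spids, c10 + cnt 10 spids, c11 + cnt 11 spids,
     c12 + cnt 12 spids] := by
  induction spids with
  | nil => intros; simp [cnt]
  | cons s rest ih =>
    intro c0 c1 c2 c3 c4 c5 c6 c7 c8 c9 c10 c11 c12
    rw [List.foldl_cons]
    rcases h : groupOf.get? s with _ | j
    · simp only [bStep, h]
      rw [ih]
      simp [cnt, h]
    · have hj : j < 13 := groupOf_lt s j h
      interval_cases j <;>
        (simp only [bStep, h, List.set, List.getD, List.getElem?_cons_zero,
           List.getElem?_cons_succ, Option.getD_some]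
         rw [ih]
         simp [cnt, h]
         omega)

-- the 27 keys of groupOf
def bigKeys : List String :=
  ["dnov","dvir","dmoj","dnav","dinn","dgri","dhyd","dgua","dsob","dbip",
   "dana","dser","dkik","dele","drho","dtak","dbia","dsuz","dspu","dere","dtei","dsan",
   "dyak","dmel","dmau","dsim","dsec"]

lemma pred_eq0 :
    (fun s : String => groupOf.get? s == some 0) = (fun s => (gList.getD 0 []).contains s) := by
  funext s
  by_cases hs : s ∈ bigKeys
  · fin_cases hs <;> decide
  · have h1 : groupOf.get? s = none := by
      rw [PySem.Dict.get?_eq_none_iff_not_mem_keys]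
      simpa [groupOf, bigKeys] using hs
    have h2 : s ∉ (gList.getD 0 []) := by
      simp only [gList, conditionsA, List.map, List.getD, List.getElem?_cons_zero,
        List.getElem?_cons_succ, Option.getD_some, List.mem_cons, List.not_mem_nil, or_false]
      intro hm
      apply hs
      simp only [bigKeys, List.mem_cons, List.not_mem_nil, or_false]
      tauto
    simp [h1, List.contains_eq_mem]
    exact h2

lemma pred_eq1 :
    (fun s : String => groupOf.get? s == some 1) = (fun s => (gList.getD 1 []).contains s) := by
  funext s
  by_cases hs : s ∈ bigKeys
  · fin_cases hs <;> decide
  · have h1 : groupOf.get? s = none := by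
      rw [PySem.Dict.get?_eq_none_iff_not_mem_keys]
      simpa [groupOf, bigKeys] using hs
    have h2 : s ∉ (gList.getD 1 []) := by
      simp only [gList, conditionsA, List.map, List.getD, List.getElem?_cons_zero,
        List.getElem?_cons_succ, Option.getD_some, List.mem_cons, List.not_mem_nil, or_false]
      intro hm
      apply hs
      simp only [bigKeys, List.mem_cons, List.not_mem_nil, or_false]
      tauto
    simp [h1, List.contains_eq_mem]
    exact h2

lemma pred_eq2 :
    (fun s : String => groupOf.get? s == some 2) = (fun s => (gList.getD 2 []).contains s) := by
  funext s
  by_cases hs : s ∈ bigKeys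
  · fin_cases hs <;> decide
  · have h1 : groupOf.get? s = none := by
      rw [PySem.Dict.get?_eq_none_iff_not_mem_keys]
      simpa [groupOf, bigKeys] using hs
    have h2 : s ∉ (gList.getD 2 []) := by
      simp only [gList, conditionsA, List.map, List.getD, List.getElem?_cons_zero,
        List.getElem?_cons_succ, Option.getD_some, List.mem_cons, List.not_mem_nil, or_false]
      intro hm
      apply hs
      simp only [bigKeys, List.mem_cons, List.not_mem_nil, or_false]
      tauto
    simp [h1, List.contains_eq_mem]
    exact h2

lemma pred_eq3 :
    (fun s : String => groupOf.get? s == some 3) = (fun s => (gList.getD 3 []).contains s) := by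
  funext s
  by_cases hs : s ∈ bigKeys
  · fin_cases hs <;> decide
  · have h1 : groupOf.get? s = none := by
      rw [PySem.Dict.get?_eq_none_iff_not_mem_keys]
      simpa [groupOf, bigKeys] using hs
    have h2 : s ∉ (gList.getD 3 []) := by
      simp only [gList, conditionsA, List.map, List.getD, List.getElem?_cons_zero,
        List.getElem?_cons_succ, Option.getD_some, List.mem_cons, List.not_mem_nil, or_false]
      intro hm
      apply hs
      simp only [bigKeys, List.mem_cons, List.not_mem_nil, or_false]
      tauto
    simp [h1, List.contains_eq_mem]
    exact h2

lemma pred_eq4 :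
    (fun s : String => groupOf.get? s == some 4) = (fun s => (gList.getD 4 []).contains s) := by
  funext s
  by_cases hs : s ∈ bigKeys
  · fin_cases hs <;> decide
  · have h1 : groupOf.get? s = none := by
      rw [PySem.Dict.get?_eq_none_iff_not_mem_keys]
      simpa [groupOf, bigKeys] using hs
    have h2 : s ∉ (gList.getD 4 []) := by
      simp only [gList, conditionsA, List.map, List.getD, List.getElem?_cons_zero,
        List.getElem?_cons_succ, Option.getD_some, List.mem_cons, List.not_mem_nil, or_false]
      intro hm
      apply hs
      simp only [bigKeys, List.mem_cons, List.not_mem_nil, or_false]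
      tauto
    simp [h1, List.contains_eq_mem]
    exact h2

lemma pred_eq5 :
    (fun s : String => groupOf.get? s == some 5) = (fun s => (gList.getD 5 []).contains s) := by
  funext s
  by_cases hs : s ∈ bigKeys
  · fin_cases hs <;> decide
  · have h1 : groupOf.get? s = none := by
      rw [PySem.Dict.get?_eq_none_iff_not_mem_keys]
      simpa [groupOf, bigKeys] using hs
    have h2 : s ∉ (gList.getD 5 []) := by
      simp only [gList, conditionsA, List.map, List.getD, List.getElem?_cons_zero,
        List.getElem?_cons_succ, Option.getD_some, List.mem_cons, List.not_mem_nil, or_false]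
      intro hm
      apply hs
      simp only [bigKeys, List.mem_cons, List.not_mem_nil, or_false]
      tauto
    simp [h1, List.contains_eq_mem]
    exact h2

lemma pred_eq6 :
    (fun s : String => groupOf.get? s == some 6) = (fun s => (gList.getD 6 []).contains s) := by
  funext s
  by_cases hs : s ∈ bigKeys
  · fin_cases hs <;> decide
  · have h1 : groupOf.get? s = none := by
      rw [PySem.Dict.get?_eq_none_iff_not_mem_keys]
      simpa [groupOf, bigKeys] using hs
    have h2 : s ∉ (gList.getD 6 []) := by
      simp only [gList, conditionsA, List.map, List.getD, List.getElem?_cons_zero,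
        List.getElem?_cons_succ, Option.getD_some, List.mem_cons, List.not_mem_nil, or_false]
      intro hm
      apply hs
      simp only [bigKeys, List.mem_cons, List.not_mem_nil, or_false]
      tauto
    simp [h1, List.contains_eq_mem]
    exact h2

lemma pred_eq7 :
    (fun s : String => groupOf.get? s == some 7) = (fun s => (gList.getD 7 []).contains s) := by
  funext s
  by_cases hs : s ∈ bigKeys
  · fin_cases hs <;> decide
  · have h1 : groupOf.get? s = none := by
      rw [PySem.Dict.get?_eq_none_iff_not_mem_keys]
      simpa [groupOf, bigKeys] using hs
    have h2 : s ∉ (gList.getD 7 []) := by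
      simp only [gList, conditionsA, List.map, List.getD, List.getElem?_cons_zero,
        List.getElem?_cons_succ, Option.getD_some, List.mem_cons, List.not_mem_nil, or_false]
      intro hm
      apply hs
      simp only [bigKeys, List.mem_cons, List.not_mem_nil, or_false]
      tauto
    simp [h1, List.contains_eq_mem]
    exact h2

lemma pred_eq8 :
    (fun s : String => groupOf.get? s == some 8) = (fun s => (gList.getD 8 []).contains s) := by
  funext s
  by_cases hs : s ∈ bigKeys
  · fin_cases hs <;> decide
  · have h1 : groupOf.get? s = none := by
      rw [PySem.Dict.get?_eq_none_iff_not_mem_keys]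
      simpa [groupOf, bigKeys] using hs
    have h2 : s ∉ (gList.getD 8 []) := by
      simp only [gList, conditionsA, List.map, List.getD, List.getElem?_cons_zero,
        List.getElem?_cons_succ, Option.getD_some, List.mem_cons, List.not_mem_nil, or_false]
      intro hm
      apply hs
      simp only [bigKeys, List.mem_cons, List.not_mem_nil, or_false]
      tauto
    simp [h1, List.contains_eq_mem]
    exact h2

lemma pred_eq9 :
    (fun s : String => groupOf.get? s == some 9) = (fun s => (gList.getD 9 []).contains s) := by
  funext s
  by_cases hs : s ∈ bigKeys
  · fin_cases hs <;> decide
  · have h1 : groupOf.get? s = none := by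
      rw [PySem.Dict.get?_eq_none_iff_not_mem_keys]
      simpa [groupOf, bigKeys] using hs
    have h2 : s ∉ (gList.getD 9 []) := by
      simp only [gList, conditionsA, List.map, List.getD, List.getElem?_cons_zero,
        List.getElem?_cons_succ, Option.getD_some, List.mem_cons, List.not_mem_nil, or_false]
      intro hm
      apply hs
      simp only [bigKeys, List.mem_cons, List.not_mem_nil, or_false]
      tauto
    simp [h1, List.contains_eq_mem]
    exact h2

lemma pred_eq10 :
    (fun s : String => groupOf.get? s == some 10) = (fun s => (gList.getD 10 []).contains s) := by
  funext s
  by_cases hs : s ∈ bigKeys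
  · fin_cases hs <;> decide
  · have h1 : groupOf.get? s = none := by
      rw [PySem.Dict.get?_eq_none_iff_not_mem_keys]
      simpa [groupOf, bigKeys] using hs
    have h2 : s ∉ (gList.getD 10 []) := by
      simp only [gList, conditionsA, List.map, List.getD, List.getElem?_cons_zero,
        List.getElem?_cons_succ, Option.getD_some, List.mem_cons, List.not_mem_nil, or_false]
      intro hm
      apply hs
      simp only [bigKeys, List.mem_cons, List.not_mem_nil, or_false]
      tauto
    simp [h1, List.contains_eq_mem]
    exact h2

lemma pred_eq11 :
    (fun s : String => groupOf.get? s == some 11) = (fun s => (gList.getD 11 []).contains s) := by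
  funext s
  by_cases hs : s ∈ bigKeys
  · fin_cases hs <;> decide
  · have h1 : groupOf.get? s = none := by
      rw [PySem.Dict.get?_eq_none_iff_not_mem_keys]
      simpa [groupOf, bigKeys] using hs
    have h2 : s ∉ (gList.getD 11 []) := by
      simp only [gList, conditionsA, List.map, List.getD, List.getElem?_cons_zero,
        List.getElem?_cons_succ, Option.getD_some, List.mem_cons, List.not_mem_nil, or_false]
      intro hm
      apply hs
      simp only [bigKeys, List.mem_cons, List.not_mem_nil, or_false]
      tauto
    simp [h1, List.contains_eq_mem]
    exact h2

lemma pred_eq12 :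
    (fun s : String => groupOf.get? s == some 12) = (fun s => (gList.getD 12 []).contains s) := by
  funext s
  by_cases hs : s ∈ bigKeys
  · fin_cases hs <;> decide
  · have h1 : groupOf.get? s = none := by
      rw [PySem.Dict.get?_eq_none_iff_not_mem_keys]
      simpa [groupOf, bigKeys] using hs
    have h2 : s ∉ (gList.getD 12 []) := by
      simp only [gList, conditionsA, List.map, List.getD, List.getElem?_cons_zero,
        List.getElem?_cons_succ, Option.getD_some, List.mem_cons, List.not_mem_nil, or_false]
      intro hm
      apply hs
      simp only [bigKeys, List.mem_cons, List.not_mem_nil, or_false]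
      tauto
    simp [h1, List.contains_eq_mem]
    exact h2

-- ===== VERDICT (by name: the statement is the Claim_ definition above) =====
theorem spid_filter_spec : Claim_equal_spid_filter := by
  intro spids _
  unfold Spec_spid_filter
  simp only [spid_filter_alt]
  rw [show (List.replicate 13 0 : List Nat) = [0,0,0,0,0,0,0,0,0,0,0,0,0] from rfl, bFold_eq]
  simp only [Nat.zero_add]
  simp only [cnt]
  rw [pred_eq0, pred_eq1, pred_eq2, pred_eq3, pred_eq4, pred_eq5, pred_eq6, pred_eq7,
    pred_eq8, pred_eq9, pred_eq10, pred_eq11, pred_eq12]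
  simp only [List.countP_eq_length_filter]
  simp [spid_filter, conditionsA, gList, bNums]
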